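-- pv_equiv track=rewrite | github.com/hboonewilson/1CS | Discussion/ds3.py | part6
-- ===== SOURCE A (Python) =====
-- def part6(inputString, charsToIgnore):
--     largestChar = None
--     indexOfLargestChar = None
--     for i in range (0, len(inputString)):
--         charinignore = False
--         for char in charsToIgnore:
--             if inputString[i] == char:
--                 charinignore = True
--                 break
--         if not charinignore:
--             if (largestChar == None) or (largestChar < inputString[i]):
--                 largestChar = inputString[i]
--                 indexOfLargestChar = i
--     return largestChar, indexOfLargestChar
-- ===== SOURCE B (Python) =====
-- def part6(inputString, charsToIgnore):
--     candidates = [c for c in inputString if c not in charsToIgnore]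
--     if not candidates:
--         return None, None
--     largest = max(candidates)
--     return largest, inputString.index(largest)
-- ===== Notes on version B (the rewrite author's own statement) =====
-- stated objective: simpler
-- what changed: Replaces A's fused index loop (hand-written inner ignore-scan plus running max-with-index) by three plain steps: filter out ignored characters, take max() of the candidates, recover the first index with str.index (valid because the maximum is itself non-ignored, so its first occurrence equals the first candidate occurrence).
import Mathlib
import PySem

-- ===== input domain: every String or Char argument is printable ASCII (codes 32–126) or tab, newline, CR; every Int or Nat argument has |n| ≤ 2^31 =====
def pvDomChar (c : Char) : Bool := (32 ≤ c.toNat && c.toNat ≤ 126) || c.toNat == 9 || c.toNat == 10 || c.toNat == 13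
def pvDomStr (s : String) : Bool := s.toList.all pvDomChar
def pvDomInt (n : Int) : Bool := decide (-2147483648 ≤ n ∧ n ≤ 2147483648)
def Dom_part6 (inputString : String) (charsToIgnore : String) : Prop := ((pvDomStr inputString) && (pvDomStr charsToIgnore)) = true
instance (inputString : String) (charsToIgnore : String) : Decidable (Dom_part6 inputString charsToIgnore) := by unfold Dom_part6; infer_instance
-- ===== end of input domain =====

-- B replaces A's fused running-max-with-index loop (with a hand-rolled inner ignore scan)
-- by three steps: filter the non-ignored characters, take their max, look up its first index.
-- Python's 1-character strings are ported as Char (==/< on singleton strings agree with Char);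
-- the returned character is converted back with String.singleton.

-- ===== PORT A =====
-- inner loop 'for char in charsToIgnore: if inputString[i] == char: break' (first-match scan)
def part6Ignored (c : Char) : List Char → Bool
  | [] => false
  | ch :: rest => if c == ch then true else part6Ignored c rest

def part6 (inputString : String) (charsToIgnore : String) : Option String × Option Int :=
  let s := inputString.toList
  let res := (PySem.List.pyRange 0 (PySem.Str.len inputString) 1).foldl
    (fun (st : Option Char × Option Int) i =>
      let c := PySem.List.pyGetD s i ' '          -- inputString[i]; i is always in range
      let charinignore := part6Ignored c charsToIgnore.toList
      if !charinignore then
        match st.1 with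
        | none => (some c, some i)
        | some l => if l < c then (some c, some i) else st
      else st)
    (none, none)
  (res.1.map String.singleton, res.2)

-- ===== PORT B =====
def part6_alt (inputString : String) (charsToIgnore : String) : Option String × Option Int :=
  let candidates := inputString.toList.filter (fun c => !(charsToIgnore.toList.contains c))
  match PySem.List.max? candidates (fun c => c) with
  | none => (none, none)                           -- 'if not candidates: return None, None'
  | some m =>                                      -- largest = max(candidates)
      (some (String.singleton m),
       (PySem.List.index? inputString.toList m).map (fun k => (k : Int)))  -- inputString.index(largest)

-- ===== PRECONDITION & SPEC =====
def Spec_part6 (inputString : String) (charsToIgnore : String) (out : Option String × Option Int) : Prop := out = part6_alt inputString charsToIgnore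
instance (inputString : String) (charsToIgnore : String) (out : Option String × Option Int) : Decidable (Spec_part6 inputString charsToIgnore out) := by unfold Spec_part6; infer_instance

-- ===== CLAIM (what is proved, stated in full; the proofs are below) =====
def Claim_equal_part6 : Prop := ∀ (inputString : String) (charsToIgnore : String), Dom_part6 inputString charsToIgnore → Spec_part6 inputString charsToIgnore (part6 inputString charsToIgnore)

-- ===== LEMMAS AND PROOFS =====

-- A's inner scan is List.contains
theorem part6Ignored_eq_contains (c : Char) (ig : List Char) :
    part6Ignored c ig = ig.contains c := by
  induction ig with
  | nil => rfl
  | cons ch rest ih =>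
      simp [part6Ignored, ih]

-- A's step over (index, char) pairs
def part6StepE (p : Char → Bool) (st : Option Char × Option Int) (ic : Int × Char) :
    Option Char × Option Int :=
  if p ic.2 then
    match st.1 with
    | none => (some ic.2, some ic.1)
    | some l => if l < ic.2 then (some ic.2, some ic.1) else st
  else st

-- B's char-level result
def part6BChar (p : Char → Bool) (s : List Char) : Option Char × Option Int :=
  match PySem.List.max? (s.filter p) (fun c => c) with
  | none => (none, none)
  | some m => (some m, (PySem.List.index? s m).map (fun k => (k : Int)))



theorem part6_main (p : Char → Bool) (s : List Char) :
    (PySem.List.enumerate s 0).foldl (part6StepE p) (none, none) = part6BChar p s := by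
  induction s using List.reverseRecOn with
  | nil => rfl
  | append_singleton s c ih =>
    rw [PySem.List.enumerate_append, List.foldl_append, ih]
    have hone : PySem.List.enumerate [c] (0 + (s.length : Int)) = [((s.length : Int), c)] := by
      simp [PySem.List.enumerate_cons, PySem.List.enumerate_nil]
    rw [hone]
    cases hpc : p c with
    | false =>
      have hf : (s ++ [c]).filter p = s.filter p := by simp [List.filter_append, hpc]
      cases hM : PySem.List.max? (s.filter p) (fun c => c) with
      | none => simp [part6BChar, part6StepE, hf, hM, hpc]
      | some m =>
        have hm : m ∈ s := List.mem_of_mem_filter (PySem.List.max?_mem hM)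
        have hidx : List.idxOf? m (s ++ [c]) = List.idxOf? m s := by
          simpa using PySem.List.index?_append_of_mem (l := s) [c] (v := m) hm
        simp [part6BChar, part6StepE, hf, hM, hpc, hidx]
    | true =>
      have hf : (s ++ [c]).filter p = s.filter p ++ [c] := by simp [List.filter_append, hpc]
      cases hM : PySem.List.max? (s.filter p) (fun c => c) with
      | none =>
        have hnil : s.filter p = [] := (PySem.List.max?_eq_none_iff _ _).mp hM
        have hns : c ∉ s := by
          intro hcs
          have hc : c ∈ s.filter p := List.mem_filter.mpr ⟨hcs, hpc⟩
          rw [hnil] at hc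
          exact absurd hc (List.not_mem_nil)
        have hmax : PySem.List.max? ((s.filter p) ++ [c]) (fun y => y) = some c := by
          rw [hnil]
          simpa using PySem.List.max?_id_cons c []
        have hidx : List.idxOf? c (s ++ [c]) = some s.length := by
          simpa using PySem.List.index?_append_singleton_self s c hns
        simp [part6BChar, part6StepE, hf, hM, hmax, hpc, hidx]
      | some m =>
        have hm : m ∈ s := List.mem_of_mem_filter (PySem.List.max?_mem hM)
        obtain ⟨x, t, hcs⟩ : ∃ x t, s.filter p = x :: t := by
          cases h : s.filter p with
          | nil =>
            rw [h, (PySem.List.max?_eq_none_iff ([] : List Char) (fun c => c)).mpr rfl] at hM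
            simp at hM
          | cons a b => exact ⟨a, b, rfl⟩
        have hmax2 : PySem.List.max? ((s.filter p) ++ [c]) (fun y => y) = some (max m c) := by
          rw [hcs] at hM ⊢
          rw [PySem.List.max?_id_cons] at hM
          rw [List.cons_append, PySem.List.max?_id_cons, List.foldl_append]
          simp only [Option.some.injEq] at hM
          simp [← hM, List.foldl]
        by_cases hlt : m < c
        · have hns : c ∉ s := by
            intro hcsm
            have hcf : c ∈ s.filter p := List.mem_filter.mpr ⟨hcsm, hpc⟩
            exact absurd (PySem.List.max?_isMax hM c hcf) (not_le.mpr hlt)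
          have hmax3 := hmax2
          rw [max_eq_right hlt.le] at hmax3
          have hidx : List.idxOf? c (s ++ [c]) = some s.length := by
            simpa using PySem.List.index?_append_singleton_self s c hns
          simp [part6BChar, part6StepE, hf, hM, hmax3, hpc, hlt, hidx]
        · have hmc : max m c = m := max_eq_left (not_lt.mp hlt)
          have hmax3 := hmax2
          rw [hmc] at hmax3
          have hidx : List.idxOf? m (s ++ [c]) = List.idxOf? m s := by
            simpa using PySem.List.index?_append_of_mem (l := s) [c] (v := m) hm
          simp [part6BChar, part6StepE, hf, hM, hmax3, hpc, hlt, hidx]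

theorem part6_spec' (inputString charsToIgnore : String) :
    part6 inputString charsToIgnore = part6_alt inputString charsToIgnore := by
  simp only [part6, part6_alt]
  have hfold :
      List.foldl
        (fun (st : Option Char × Option Int) i =>
          if (!part6Ignored (PySem.List.pyGetD inputString.toList i ' ') charsToIgnore.toList) = true then
            match st.1 with
            | none => (some (PySem.List.pyGetD inputString.toList i ' '), some i)
            | some l =>
              if l < PySem.List.pyGetD inputString.toList i ' ' then
                (some (PySem.List.pyGetD inputString.toList i ' '), some i)
              else st
          else st)
        (none, none) (PySem.List.pyRange 0 (PySem.Str.len inputString))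
      = List.foldl (part6StepE (fun c => !(charsToIgnore.toList.contains c))) (none, none)
          (PySem.List.enumerate inputString.toList) := by
    rw [PySem.List.enumerate_eq_map_pyRange inputString.toList ' ', List.foldl_map]
    have hlen : PySem.Str.len inputString = PySem.List.len inputString.toList := by
      simp [PySem.Str.len_eq, PySem.List.len_eq]
    rw [hlen]
    congr 1
    funext st i
    simp [part6StepE, part6Ignored_eq_contains]
  rw [hfold, part6_main]
  simp only [part6BChar]
  cases hM : PySem.List.max? (inputString.toList.filter fun c => !(charsToIgnore.toList.contains c)) (fun c => c) with
  | none => simp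
  | some m => simp

-- ===== VERDICT (by name: the statement is the Claim_ definition above) =====
theorem part6_spec : Claim_equal_part6 := by
  intro s ig _
  exact part6_spec' s ig
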